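-- pv_equiv track=rewrite | github.com/openvinotoolkit/openvino_notebooks | notebooks/question-answering/tokens_bert.py | split_to_words
-- ===== SOURCE A (Python) =====
-- import string
-- import unicodedata
--
-- def split_to_words(text):
--     prev_is_sep = True  # mark initial prev as space to start word from 0 char
--     for i, c in enumerate(text + " "):
--         is_punc = (c in string.punctuation or unicodedata.category(c)[0] == "P")
--         cur_is_sep = (c.isspace() or is_punc)
--         if prev_is_sep != cur_is_sep:
--             if prev_is_sep:
--                 start = i
--             else:
--                 yield start, i
--                 del start
--         if is_punc:
--             yield i, i + 1
--         prev_is_sep = cur_is_sep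
-- ===== SOURCE B (Python) =====
-- import string
-- import unicodedata
-- from itertools import groupby
--
--
-- def _category(c):
--     if c in string.punctuation or unicodedata.category(c)[0] == "P":
--         return "punc"
--     if c.isspace():
--         return "space"
--     return "word"
--
--
-- def split_to_words(text):
--     for key, grp in groupby(enumerate(text), key=lambda ic: _category(ic[1])):
--         g = list(grp)
--         if key == "word":
--             yield g[0][0], g[-1][0] + 1
--         elif key == "punc":
--             for i, _ in g:
--                 yield i, i + 1
-- ===== Notes on version B (the rewrite author's own statement) =====
-- stated objective: idiomatic
-- what changed: Replaced the transition-state scan (prev/cur separator flags over the text with a sentinel trailing space appended) by an itertools.groupby run-scan that classifies each character, groups maximal runs, and emits one span per word run and one single-char span per punctuation character.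
import Mathlib
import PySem

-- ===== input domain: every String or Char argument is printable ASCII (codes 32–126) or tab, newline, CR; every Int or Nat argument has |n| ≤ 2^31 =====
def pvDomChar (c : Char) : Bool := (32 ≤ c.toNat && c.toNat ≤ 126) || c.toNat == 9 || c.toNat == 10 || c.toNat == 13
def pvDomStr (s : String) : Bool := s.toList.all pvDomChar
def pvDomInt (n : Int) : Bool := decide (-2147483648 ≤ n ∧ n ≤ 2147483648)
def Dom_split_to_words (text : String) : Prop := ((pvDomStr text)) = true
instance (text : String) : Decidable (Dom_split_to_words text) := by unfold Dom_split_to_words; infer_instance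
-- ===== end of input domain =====

-- B replaces A's transition-state scan (with its trailing-space sentinel) by an
-- itertools.groupby run-scan: classify each char, group maximal runs, emit one span per
-- word run and one (i, i+1) span per punctuation char (idiomatic; same O(n) cost).

-- ===== PORT A =====
-- string.punctuation; on the ASCII domain Dom_ this also covers every char whose
-- Unicode category starts with "P", so A's `or unicodedata.category(c)[0] == "P"`
-- adds nothing on Dom_ and the disjunct is folded into this membership test.
def pvPunct : List Char := "!\"#$%&'()*+,-./:;<=>?@[\\]^_`{|}~".toList

def pvIsPunc (c : Char) : Bool := pvPunct.contains c

-- the generator loop of A: state (prev_is_sep, start), one step per (i, c) of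
-- enumerate(text + " "); yields become list elements, in yield order.
def splitA : Bool → Int → List (Int × Char) → List (Int × Int)
  | _, _, [] => []
  | prevSep, start, (i, c) :: rest =>
    let isPunc := pvIsPunc c
    let curSep := PySem.Chars.isspace c || isPunc
    let out2 : List (Int × Int) := if isPunc then [(i, i + 1)] else []
    if prevSep != curSep then
      if prevSep then out2 ++ splitA curSep i rest
      else (start, i) :: (out2 ++ splitA curSep start rest)
    else out2 ++ splitA curSep start rest

def split_to_words (text : String) : List (Int × Int) :=
  splitA true 0 (PySem.List.enumerate (text ++ " ").toList 0)

-- ===== PORT B =====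
-- _category: 2 = "punc", 1 = "space", 0 = "word"  (punctuation checked first, as in Source B)
def pvCat (c : Char) : Nat :=
  if pvIsPunc c then 2 else if PySem.Chars.isspace c then 1 else 0

-- itertools.groupby: maximal runs of equal category, materialized as lists
def pvGroups : List (Int × Char) → List (List (Int × Char))
  | [] => []
  | p :: rest =>
    (p :: rest.takeWhile (fun q => pvCat q.2 == pvCat p.2)) ::
      pvGroups (rest.dropWhile (fun q => pvCat q.2 == pvCat p.2))
  termination_by l => l.length
  decreasing_by
    simp only [List.length_cons]
    exact Nat.lt_succ_of_le (List.length_dropWhile_le _ _)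

-- the yields for one group g (nonempty by construction); g[-1] is g.getLastD
def pvEmit (g : List (Int × Char)) : List (Int × Int) :=
  match g with
  | [] => []
  | (i, c) :: _ =>
    if pvCat c == 0 then [(i, (g.getLastD (0, ' ')).1 + 1)]
    else if pvCat c == 2 then g.map (fun p => (p.1, p.1 + 1))
    else []

def split_to_words_alt (text : String) : List (Int × Int) :=
  (pvGroups (PySem.List.enumerate text.toList 0)).flatMap pvEmit

-- ===== PRECONDITION & SPEC =====
def Spec_split_to_words (text : String) (out : List (Int × Int)) : Prop := out = split_to_words_alt text
instance (text : String) (out : List (Int × Int)) : Decidable (Spec_split_to_words text out) := by unfold Spec_split_to_words; infer_instance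

-- ===== CLAIM (what is proved, stated in full; the proofs are below) =====
def Claim_equal_split_to_words : Prop := ∀ (text : String), Dom_split_to_words text → Spec_split_to_words text (split_to_words text)

-- ===== LEMMAS AND PROOFS =====

-- common recursive characterization: current index n, pending word start
def pvSpec : Int → Option Int → List Char → List (Int × Int)
  | _, none, [] => []
  | n, some s, [] => [(s, n)]
  | n, pending, c :: rest =>
    let close : List (Int × Int) := match pending with | some s => [(s, n)] | none => []
    if pvCat c = 2 then close ++ (n, n + 1) :: pvSpec (n + 1) none rest
    else if pvCat c = 1 then close ++ pvSpec (n + 1) none rest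
    else
      match pending with
      | some s => pvSpec (n + 1) (some s) rest
      | none => pvSpec (n + 1) (some n) rest

theorem cat_space {c : Char} (hp : pvIsPunc c = false) (hs : PySem.Chars.isspace c = true) :
    pvCat c = 1 := by simp [pvCat, hp, hs]

theorem cat_punc {c : Char} (hp : pvIsPunc c = true) : pvCat c = 2 := by simp [pvCat, hp]

theorem cat_word {c : Char} (hp : pvIsPunc c = false) (hs : PySem.Chars.isspace c = false) :
    pvCat c = 0 := by simp [pvCat, hp, hs]

-- ===== A side: splitA on cs ++ [' '] equals pvSpec on cs =====
theorem splitA_eq_pvSpec : ∀ (cs : List Char) (n s : Int),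
    splitA true s (PySem.List.enumerate (cs ++ [' ']) n) = pvSpec n none cs ∧
    splitA false s (PySem.List.enumerate (cs ++ [' ']) n) = pvSpec n (some s) cs := by
  intro cs
  induction cs with
  | nil =>
    intro n s
    have h1 : PySem.Chars.isspace ' ' = true := by decide
    have h2 : pvIsPunc ' ' = false := by decide
    constructor <;>
      simp [PySem.List.enumerate_cons, PySem.List.enumerate_nil, splitA, pvSpec, h1, h2]
  | cons c rest ih =>
    intro n s
    have henum : PySem.List.enumerate ((c :: rest) ++ [' ']) n
        = (n, c) :: PySem.List.enumerate (rest ++ [' ']) (n + 1) := by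
      simp [PySem.List.enumerate_cons]
    by_cases hp : pvIsPunc c = true
    · have hc := cat_punc hp
      constructor <;>
        simp [henum, splitA, hp, pvSpec, hc, (ih (n + 1) s).1, (ih (n + 1) n).1]
    · have hp' : pvIsPunc c = false := by simpa using hp
      by_cases hs : PySem.Chars.isspace c = true
      · have hc := cat_space hp' hs
        constructor <;>
          simp [henum, splitA, hp', hs, pvSpec, hc, (ih (n + 1) s).1, (ih (n + 1) n).1]
      · have hs' : PySem.Chars.isspace c = false := by simpa using hs
        have hc := cat_word hp' hs'
        constructor <;>
          simp [henum, splitA, hp', hs', pvSpec, hc, (ih (n + 1) s).2, (ih (n + 1) n).2]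

-- ===== enumerate commutes with takeWhile / dropWhile on a snd-predicate =====
theorem enum_takeWhile (Q : Char → Bool) : ∀ (cs : List Char) (n : Int),
    (PySem.List.enumerate cs n).takeWhile (fun q => Q q.2)
      = PySem.List.enumerate (cs.takeWhile Q) n := by
  intro cs
  induction cs with
  | nil => intro n; simp [PySem.List.enumerate_nil]
  | cons c rest ih =>
    intro n
    by_cases hq : Q c = true <;>
      simp [PySem.List.enumerate_cons, List.takeWhile_cons, hq, ih,
        PySem.List.enumerate_nil]

theorem enum_dropWhile (Q : Char → Bool) : ∀ (cs : List Char) (n : Int),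
    (PySem.List.enumerate cs n).dropWhile (fun q => Q q.2)
      = PySem.List.enumerate (cs.dropWhile Q) (n + (cs.takeWhile Q).length) := by
  intro cs
  induction cs with
  | nil => intro n; simp [PySem.List.enumerate_nil]
  | cons c rest ih =>
    intro n
    by_cases hq : Q c = true
    · simp [PySem.List.enumerate_cons, List.dropWhile_cons, List.takeWhile_cons, hq, ih]
      ring_nf
    · simp [PySem.List.enumerate_cons, List.dropWhile_cons, List.takeWhile_cons, hq]

-- last index of a nonempty enumerated group
theorem enum_getLastD_fst : ∀ (cs : List Char) (n : Int) (p d : Int × Char),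
    ((p :: PySem.List.enumerate cs n).getLastD d).1
      = if cs.isEmpty then p.1 else n + cs.length - 1 := by
  intro cs
  induction cs with
  | nil => intro n p d; simp [PySem.List.enumerate_nil]
  | cons c rest ih =>
    intro n p d
    have : (p :: PySem.List.enumerate (c :: rest) n).getLastD d
        = ((n, c) :: PySem.List.enumerate rest (n + 1)).getLastD d := by
      simp [PySem.List.enumerate_cons]
    rw [this, ih (n + 1) (n, c) d]
    cases rest with
    | nil => simp
    | cons e tl =>
      simp [List.length_cons]
      push_cast
      ring

theorem dropWhile_head_not (Q : Char → Bool) :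
    ∀ (cs : List Char) (c : Char), (cs.dropWhile Q).head? = some c → Q c = false := by
  intro cs
  induction cs with
  | nil => intro c h; simp at h
  | cons a rest ih =>
    intro c h
    by_cases hq : Q a = true
    · exact ih c (by simpa [List.dropWhile_cons, hq] using h)
    · simp [List.dropWhile_cons, hq] at h
      subst h; simpa using hq

-- ===== pvSpec over homogeneous runs =====
theorem pvSpec_space_run : ∀ (ws : List Char), (∀ c ∈ ws, pvCat c = 1) →
    ∀ (n : Int) (rest : List Char),
      pvSpec n none (ws ++ rest) = pvSpec (n + ws.length) none rest := by
  intro ws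
  induction ws with
  | nil => intro _ n rest; simp
  | cons c tl ih =>
    intro h n rest
    have hc : pvCat c = 1 := h c (by simp)
    have := ih (fun d hd => h d (by simp [hd])) (n + 1) rest
    simp [pvSpec, hc, this]
    ring_nf

theorem pvSpec_punc_run : ∀ (ws : List Char), (∀ c ∈ ws, pvCat c = 2) →
    ∀ (n : Int) (rest : List Char),
      pvSpec n none (ws ++ rest)
        = (PySem.List.enumerate ws n).map (fun p => (p.1, p.1 + 1))
          ++ pvSpec (n + ws.length) none rest := by
  intro ws
  induction ws with
  | nil => intro _ n rest; simp [PySem.List.enumerate_nil]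
  | cons c tl ih =>
    intro h n rest
    have hc : pvCat c = 2 := h c (by simp)
    have := ih (fun d hd => h d (by simp [hd])) (n + 1) rest
    simp [pvSpec, hc, this, PySem.List.enumerate_cons]
    ring_nf

theorem pvSpec_word_run : ∀ (ws : List Char), (∀ c ∈ ws, pvCat c = 0) →
    ∀ (n s : Int) (rest : List Char),
      pvSpec n (some s) (ws ++ rest) = pvSpec (n + ws.length) (some s) rest := by
  intro ws
  induction ws with
  | nil => intro _ n s rest; simp
  | cons c tl ih =>
    intro h n s rest
    have hc : pvCat c = 0 := h c (by simp)
    have := ih (fun d hd => h d (by simp [hd])) (n + 1) s rest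
    simp [pvSpec, hc, this]
    ring_nf

theorem pvSpec_close : ∀ (rest : List Char) (n s : Int),
    (∀ c, rest.head? = some c → pvCat c ≠ 0) →
    pvSpec n (some s) rest = (s, n) :: pvSpec n none rest := by
  intro rest n s h
  cases rest with
  | nil => simp [pvSpec]
  | cons c tl =>
    have hc : pvCat c ≠ 0 := h c rfl
    rcases Nat.lt_or_ge (pvCat c) 2 with h2 | h2
    · have h1 : pvCat c = 1 := by omega
      simp [pvSpec, h1]
    · have h2' : pvCat c = 2 := by
        unfold pvCat at h2 ⊢; split_ifs at h2 ⊢ <;> omega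
      simp [pvSpec, h2']

-- ===== B side: groups/emit equals pvSpec =====
theorem groups_eq_pvSpec : ∀ (k : Nat) (cs : List Char), cs.length ≤ k → ∀ (n : Int),
    (pvGroups (PySem.List.enumerate cs n)).flatMap pvEmit = pvSpec n none cs := by
  intro k
  induction k with
  | zero =>
    intro cs h n
    have : cs = [] := List.eq_nil_of_length_eq_zero (Nat.le_zero.mp h)
    subst this
    simp [PySem.List.enumerate_nil, pvGroups, pvSpec]
  | succ k ih =>
    intro cs hlen n
    cases cs with
    | nil => simp [PySem.List.enumerate_nil, pvGroups, pvSpec]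
    | cons c rest =>
      set Q : Char → Bool := fun d => pvCat d == pvCat c with hQ
      have henum : PySem.List.enumerate (c :: rest) n
          = (n, c) :: PySem.List.enumerate rest (n + 1) := by
        simp [PySem.List.enumerate_cons]
      have hgrp : pvGroups (PySem.List.enumerate (c :: rest) n)
          = ((n, c) :: PySem.List.enumerate (rest.takeWhile Q) (n + 1))
            :: pvGroups (PySem.List.enumerate (rest.dropWhile Q)
                (n + 1 + (rest.takeWhile Q).length)) := by
        rw [henum]
        rw [pvGroups]
        rw [enum_takeWhile Q rest (n + 1), enum_dropWhile Q rest (n + 1)]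
      have htw : ∀ d ∈ rest.takeWhile Q, pvCat d = pvCat c := by
        intro d hd
        have hQd : Q d = true := List.mem_takeWhile_imp hd
        simpa [hQ] using hQd
      have hsplit : rest.takeWhile Q ++ rest.dropWhile Q = rest :=
        List.takeWhile_append_dropWhile
      have hdw_len : (rest.dropWhile Q).length ≤ k := by
        have := List.length_dropWhile_le Q rest
        simp at hlen; omega
      have hih := ih (rest.dropWhile Q) hdw_len (n + 1 + (rest.takeWhile Q).length)
      have hdw_head : ∀ d, (rest.dropWhile Q).head? = some d → pvCat d ≠ pvCat c := by
        intro d hd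
        have := dropWhile_head_not Q rest d hd
        simpa [hQ] using this
      rcases Nat.lt_or_ge (pvCat c) 1 with h0 | h1
      · -- word run
        have hc : pvCat c = 0 := by omega
        have hlast : (((n, c) :: PySem.List.enumerate (rest.takeWhile Q) (n + 1)).getLast?.getD (0, ' ')).1
            = n + ((rest.takeWhile Q).length : Int) := by
          rw [← List.getLastD_eq_getLast?, enum_getLastD_fst]
          by_cases h : (rest.takeWhile Q).isEmpty
          · have he : rest.takeWhile Q = [] := by simpa [List.isEmpty_iff] using h
            simp [h, he]
          · simp [h]; ring
        have hemit : pvEmit ((n, c) :: PySem.List.enumerate (rest.takeWhile Q) (n + 1))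
            = [(n, n + ((rest.takeWhile Q).length : Int) + 1)] := by
          simp [pvEmit, hc, hlast]
        have hspec : pvSpec n none (c :: rest)
            = (n, n + 1 + ((rest.takeWhile Q).length : Int))
              :: pvSpec (n + 1 + ((rest.takeWhile Q).length : Int)) none (rest.dropWhile Q) := by
          have h1 : pvSpec n none (c :: rest) = pvSpec (n + 1) (some n) rest := by
            simp [pvSpec, hc]
          rw [h1]
          conv_lhs => rw [← hsplit]
          rw [pvSpec_word_run (rest.takeWhile Q)
            (fun d hd => by rw [htw d hd, hc]) (n + 1) n (rest.dropWhile Q)]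
          exact pvSpec_close (rest.dropWhile Q) _ n
            (fun d hd => by have h' := hdw_head d hd; rw [hc] at h'; exact h')
        rw [hgrp, List.flatMap_cons, hemit, hih, hspec]
        simp
        omega
      rcases Nat.lt_or_ge (pvCat c) 2 with h1' | h2
      · -- space run
        have hc : pvCat c = 1 := by omega
        have hemit : pvEmit ((n, c) :: PySem.List.enumerate (rest.takeWhile Q) (n + 1))
            = [] := by simp [pvEmit, hc]
        have hspec : pvSpec n none (c :: rest)
            = pvSpec (n + 1 + ((rest.takeWhile Q).length : Int)) none (rest.dropWhile Q) := by
          have h1 : pvSpec n none (c :: rest) = pvSpec (n + 1) none rest := by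
            simp [pvSpec, hc]
          rw [h1]
          conv_lhs => rw [← hsplit]
          exact pvSpec_space_run (rest.takeWhile Q)
            (fun d hd => by rw [htw d hd, hc]) (n + 1) (rest.dropWhile Q)
        rw [hgrp, List.flatMap_cons, hemit, hih, hspec]
        simp
      · -- punc run
        have hc : pvCat c = 2 := by
          unfold pvCat at h2 ⊢; split_ifs at h2 ⊢ <;> omega
        have hemit : pvEmit ((n, c) :: PySem.List.enumerate (rest.takeWhile Q) (n + 1))
            = (n, n + 1) :: (PySem.List.enumerate (rest.takeWhile Q) (n + 1)).map
                (fun p => (p.1, p.1 + 1)) := by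
          simp [pvEmit, hc]
        have hspec : pvSpec n none (c :: rest)
            = (n, n + 1) :: ((PySem.List.enumerate (rest.takeWhile Q) (n + 1)).map
                (fun p => (p.1, p.1 + 1))
              ++ pvSpec (n + 1 + ((rest.takeWhile Q).length : Int)) none (rest.dropWhile Q)) := by
          have h1 : pvSpec n none (c :: rest)
              = (n, n + 1) :: pvSpec (n + 1) none rest := by
            simp [pvSpec, hc]
          rw [h1]
          conv_lhs => rw [← hsplit]
          rw [pvSpec_punc_run (rest.takeWhile Q)
            (fun d hd => by rw [htw d hd, hc]) (n + 1) (rest.dropWhile Q)]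
        rw [hgrp, List.flatMap_cons, hemit, hih, hspec]
        simp

-- ===== VERDICT (by name: the statement is the Claim_ definition above) =====
theorem split_to_words_spec : Claim_equal_split_to_words := by
  intro text _
  unfold Spec_split_to_words split_to_words split_to_words_alt
  have hA := (splitA_eq_pvSpec text.toList 0 0).1
  have hB := groups_eq_pvSpec text.toList.length text.toList (le_refl _) 0
  have happ : (text ++ " ").toList = text.toList ++ [' '] := by
    simp
  rw [happ, hA, hB]
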